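-- pv_equiv track=rewrite | github.com/BrandaoGoated/AASB_Portfolio_2526_Gr07 | bioinf/blast.py | _extend_left
-- ===== SOURCE A (Python) =====
-- from typing import List, Dict, Tuple
--
-- def _extend_left(query: str, seq: str, i_query: int, i_seq: int,
--                  match: int, mismatch: int) -> Tuple[int, int]:
--     """Extensão à esquerda: devolve (delta_score, extensão_em_caracteres)."""
--     limite = min(i_query, i_seq)
--     delta = 0
--     left = 0
--     # percorre o número máximo seguro de passos para a esquerda
--     for off in range(1, limite + 1):
--         delta += match if query[i_query - off] == seq[i_seq - off] else mismatch
--         left = off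
--     return delta, left
-- ===== SOURCE B (Python) =====
-- def _extend_left(query, seq, i_query, i_seq, match, mismatch):
--     ext = min(i_query, i_seq)
--     if ext <= 0:
--         return 0, 0
--
--     def score(lo, hi):
--         # delta contributed by window offsets lo..hi-1 (0 = leftmost aligned column)
--         if hi - lo == 1:
--             return match if query[i_query - ext + lo] == seq[i_seq - ext + lo] else mismatch
--         mid = (lo + hi) // 2
--         return score(lo, mid) + score(mid, hi)
--
--     return score(0, ext), ext
-- ===== Notes on version B (the rewrite author's own statement) =====
-- stated objective: alternative
-- what changed: Replaces A's linear left-to-right accumulating for-loop with a divide-and-conquer recursion that splits the aligned left window at its midpoint and sums the scores of the two halves (tree recursion over offset ranges instead of per-offset accumulation).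
import Mathlib
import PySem

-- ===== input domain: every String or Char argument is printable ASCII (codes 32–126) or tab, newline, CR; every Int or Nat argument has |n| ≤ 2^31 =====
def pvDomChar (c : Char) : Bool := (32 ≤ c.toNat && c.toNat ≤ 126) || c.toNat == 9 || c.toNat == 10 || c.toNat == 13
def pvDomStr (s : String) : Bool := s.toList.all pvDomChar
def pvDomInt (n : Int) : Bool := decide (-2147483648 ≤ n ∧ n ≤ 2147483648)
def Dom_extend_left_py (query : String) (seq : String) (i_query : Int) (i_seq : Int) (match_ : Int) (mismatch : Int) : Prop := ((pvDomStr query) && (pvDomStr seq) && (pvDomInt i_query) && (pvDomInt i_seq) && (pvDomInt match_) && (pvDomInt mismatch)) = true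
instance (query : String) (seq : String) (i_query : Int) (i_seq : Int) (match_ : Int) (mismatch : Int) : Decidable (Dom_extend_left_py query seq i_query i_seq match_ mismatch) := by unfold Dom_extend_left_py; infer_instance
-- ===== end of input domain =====

-- B scores the aligned left window by divide-and-conquer (split at the midpoint, add the two
-- halves) instead of A's linear per-offset accumulating loop; same asymptotic cost.

-- ===== PORT A =====
-- Literal port of A: loop off = 1 .. limite, indexing query[i_query-off] / seq[i_seq-off];
-- an out-of-range index (Python IndexError) drives the Option state to none.
def extend_left_py (query : String) (seq : String) (i_query : Int) (i_seq : Int) (match_ : Int) (mismatch : Int) : Int × Int :=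
  let limite := min i_query i_seq
  let res := (PySem.List.pyRange 1 (limite + 1) 1).foldl
    (fun st off =>
      match st with
      | none => none
      | some dl =>
        match PySem.Str.pyGet? query (i_query - off), PySem.Str.pyGet? seq (i_seq - off) with
        | some cq, some cs => some (dl.1 + (if cq = cs then match_ else mismatch), off)
        | _, _ => none)
    (some ((0 : Int), (0 : Int)))
  match res with
  | some dl => dl
  | none => (0, 0)    -- Python raises IndexError here; excluded by Pre_extend_left_py

-- ===== PORT B =====
-- B's inner 'score(lo, hi)': delta of window offsets lo..hi-1 by splitting at the midpoint.
-- The '_, _ => 0' arm is Python's IndexError (excluded by Pre_); 'fuel' is a totality device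
-- only (any fuel ≥ hi - lo ≥ 1 runs the recursion to its base cases, and every call has it);
-- the 'hi - lo ≤ 1' arm is likewise unreachable: score is only ever called with lo < hi.
def pvScoreB (query : String) (seq : String) (i_query : Int) (i_seq : Int) (ext : Int) (match_ : Int) (mismatch : Int) (fuel : Nat) (lo : Int) (hi : Int) : Int :=
  match fuel with
  | 0 => 0
  | fuel + 1 =>
    if hi - lo = 1 then
      match PySem.Str.pyGet? query (i_query - ext + lo), PySem.Str.pyGet? seq (i_seq - ext + lo) with
      | some cq, some cs => if cq = cs then match_ else mismatch
      | none, _ => 0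
      | some _, none => 0
    else if hi - lo ≤ 1 then 0
    else
      pvScoreB query seq i_query i_seq ext match_ mismatch fuel lo (PySem.Int.floordiv (lo + hi) 2)
        + pvScoreB query seq i_query i_seq ext match_ mismatch fuel (PySem.Int.floordiv (lo + hi) 2) hi

def extend_left_py_alt (query : String) (seq : String) (i_query : Int) (i_seq : Int) (match_ : Int) (mismatch : Int) : Int × Int :=
  let ext := min i_query i_seq
  if ext ≤ 0 then (0, 0)
  else (pvScoreB query seq i_query i_seq ext match_ mismatch ext.toNat 0 ext, ext)

-- ===== PRECONDITION & SPEC =====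
-- Pre_ excludes exactly the inputs where A raises IndexError: the loop runs (limite ≥ 1) and
-- i_query or i_seq exceeds its string's length, so the first iteration's indexing raises.
def Pre_extend_left_py (query : String) (seq : String) (i_query : Int) (i_seq : Int) (match_ : Int) (mismatch : Int) : Prop :=
  1 ≤ min i_query i_seq → (i_query ≤ (query.toList.length : Int) ∧ i_seq ≤ (seq.toList.length : Int))
instance (query : String) (seq : String) (i_query : Int) (i_seq : Int) (match_ : Int) (mismatch : Int) : Decidable (Pre_extend_left_py query seq i_query i_seq match_ mismatch) := by unfold Pre_extend_left_py; infer_instance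

def pvWitness_extend_left_py : String × String × Int × Int × Int × Int := ("GATTACA", "GACTATA", 5, 5, 2, -1)

def Spec_extend_left_py (query : String) (seq : String) (i_query : Int) (i_seq : Int) (match_ : Int) (mismatch : Int) (out : Int × Int) : Prop := out = extend_left_py_alt query seq i_query i_seq match_ mismatch
instance (query : String) (seq : String) (i_query : Int) (i_seq : Int) (match_ : Int) (mismatch : Int) (out : Int × Int) : Decidable (Spec_extend_left_py query seq i_query i_seq match_ mismatch out) := by unfold Spec_extend_left_py; infer_instance

-- ===== CLAIM (what is proved, stated in full; the proofs are below) =====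
def Claim_equal_extend_left_py : Prop := ∀ (query : String) (seq : String) (i_query : Int) (i_seq : Int) (match_ : Int) (mismatch : Int), Dom_extend_left_py query seq i_query i_seq match_ mismatch → Pre_extend_left_py query seq i_query i_seq match_ mismatch → Spec_extend_left_py query seq i_query i_seq match_ mismatch (extend_left_py query seq i_query i_seq match_ mismatch)

-- ===== LEMMAS AND PROOFS =====

-- A's loop step, abstracted over the two char lists and the (nonnegative) end indices.
def pvStep (lq ls : List Char) (nq ns : Nat) (match_ mismatch : Int) :
    Option (Int × Int) → Int → Option (Int × Int) :=
  fun st off =>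
    match st with
    | none => none
    | some dl =>
      match lq[((nq : Int) - off).toNat]?, ls[((ns : Int) - off).toNat]? with
      | some cq, some cs => some (dl.1 + (if cq = cs then match_ else mismatch), off)
      | _, _ => none

-- the matched-character count of the two aligned left windows of width L
def pvCnt (lq ls : List Char) (nq ns L : Nat) : Nat :=
  (((lq.drop (nq - L)).take L).zip ((ls.drop (ns - L)).take L)).countP (fun p => p.1 = p.2)

theorem pvCnt_succ (lq ls : List Char) (nq ns L : Nat)
    (h1 : L + 1 ≤ nq) (h2 : nq ≤ lq.length) (h3 : L + 1 ≤ ns) (h4 : ns ≤ ls.length) :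
    pvCnt lq ls nq ns (L + 1)
      = pvCnt lq ls nq ns L
        + (if lq[nq - (L + 1)]'(by omega) = ls[ns - (L + 1)]'(by omega) then 1 else 0) := by
  unfold pvCnt
  rw [List.drop_eq_getElem_cons (by omega : nq - (L + 1) < lq.length),
      List.drop_eq_getElem_cons (by omega : ns - (L + 1) < ls.length)]
  have e1 : nq - (L + 1) + 1 = nq - L := by omega
  have e2 : ns - (L + 1) + 1 = ns - L := by omega
  rw [e1, e2]
  simp [List.countP_cons]

-- A's loop, evaluated in closed form: the running pair after the full loop of width L
theorem pvLoop (lq ls : List Char) (nq ns : Nat) (match_ mismatch : Int) :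
    ∀ L : Nat, L ≤ nq → nq ≤ lq.length → L ≤ ns → ns ≤ ls.length →
    (PySem.List.pyRange 1 ((L : Int) + 1) 1).foldl (pvStep lq ls nq ns match_ mismatch)
        (some ((0 : Int), (0 : Int)))
      = some ((pvCnt lq ls nq ns L : Int) * match_
                + ((L : Int) - (pvCnt lq ls nq ns L : Int)) * mismatch,
              if L = 0 then 0 else (L : Int)) := by
  intro L
  induction L with
  | zero =>
    intro _ _ _ _
    rw [PySem.List.pyRange_one_eq_nil (by omega)]
    simp [pvCnt]
  | succ L ih =>
    intro h1 h2 h3 h4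
    have hrange : PySem.List.pyRange 1 (((L + 1 : Nat) : Int) + 1) 1
        = PySem.List.pyRange 1 ((L : Int) + 1) 1 ++ [(L : Int) + 1] := by
      push_cast
      exact PySem.List.pyRange_one_succ_right (by omega)
    rw [hrange, List.foldl_append, ih (by omega) h2 (by omega) h4]
    have hq : (((nq : Int) - ((L : Int) + 1)).toNat) = nq - (L + 1) := by omega
    have hs : (((ns : Int) - ((L : Int) + 1)).toNat) = ns - (L + 1) := by omega
    have hq' : lq[((nq : Int) - ((L : Int) + 1)).toNat]? = some (lq[nq - (L + 1)]'(by omega)) := by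
      rw [hq]; exact List.getElem?_eq_getElem (by omega)
    have hs' : ls[((ns : Int) - ((L : Int) + 1)).toNat]? = some (ls[ns - (L + 1)]'(by omega)) := by
      rw [hs]; exact List.getElem?_eq_getElem (by omega)
    simp only [List.foldl_cons, List.foldl_nil, pvStep, hq', hs']
    rw [pvCnt_succ lq ls nq ns L h1 h2 h3 h4]
    by_cases hc : lq[nq - (L + 1)]'(by omega) = ls[ns - (L + 1)]'(by omega)
    · rw [if_pos hc, if_pos hc]
      simp only [Option.some.injEq, Prod.mk.injEq]
      refine ⟨by push_cast; ring, by simp⟩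
    · rw [if_neg hc, if_neg hc]
      simp only [Option.some.injEq, Prod.mk.injEq]
      refine ⟨by push_cast; ring, by simp⟩

-- linear reference sum of B's per-column scores over window offsets lo..lo+n-1
def pvCsum (lq ls : List Char) (bq bs : Nat) (match_ mismatch : Int) : Nat → Nat → Int
  | _, 0 => 0
  | lo, n + 1 =>
      (if lq.getD (bq + lo) 'a' = ls.getD (bs + lo) 'a' then match_ else mismatch)
        + pvCsum lq ls bq bs match_ mismatch (lo + 1) n

theorem pvCsum_split (lq ls : List Char) (bq bs : Nat) (m mm : Int) :
    ∀ a lo b, pvCsum lq ls bq bs m mm lo (a + b)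
      = pvCsum lq ls bq bs m mm lo a + pvCsum lq ls bq bs m mm (lo + a) b := by
  intro a
  induction a with
  | zero => intro lo b; simp [pvCsum]
  | succ a ih =>
    intro lo b
    have e : a + 1 + b = (a + b) + 1 := by omega
    rw [e]
    simp only [pvCsum, ih (lo + 1) b]
    have e2 : lo + 1 + a = lo + (a + 1) := by omega
    rw [e2]; ring

-- B's divide-and-conquer score equals the linear reference sum
theorem pvScoreB_eq (query seq : String) (nq ns L : Nat) (m mm : Int)
    (hLq : L ≤ nq) (h2 : nq ≤ query.toList.length)
    (hLs : L ≤ ns) (h4 : ns ≤ seq.toList.length) :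
    ∀ n : Nat, ∀ lo fuel : Nat, 1 ≤ n → n ≤ fuel → lo + n ≤ L →
    pvScoreB query seq (nq : Int) (ns : Int) (L : Int) m mm fuel (lo : Int) ((lo : Int) + (n : Int))
      = pvCsum query.toList seq.toList (nq - L) (ns - L) m mm lo n := by
  intro n
  induction n using Nat.strong_induction_on with
  | _ n ih =>
    intro lo fuel hn hfuel hlon
    obtain ⟨f, rfl⟩ : ∃ f, fuel = f + 1 := ⟨fuel - 1, by omega⟩
    by_cases h1 : n = 1
    · subst h1
      simp only [pvScoreB]
      rw [if_pos (by push_cast; ring)]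
      have g1 : PySem.Str.pyGet? query ((nq : Int) - (L : Int) + (lo : Int))
          = some (query.toList[nq - L + lo]'(by omega)) := by
        rw [show (nq : Int) - (L : Int) + (lo : Int) = ((nq - L + lo : Nat) : Int) by omega,
            PySem.Str.pyGet?_natCast]
        exact List.getElem?_eq_getElem (by omega)
      have g2 : PySem.Str.pyGet? seq ((ns : Int) - (L : Int) + (lo : Int))
          = some (seq.toList[ns - L + lo]'(by omega)) := by
        rw [show (ns : Int) - (L : Int) + (lo : Int) = ((ns - L + lo : Nat) : Int) by omega,
            PySem.Str.pyGet?_natCast]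
        exact List.getElem?_eq_getElem (by omega)
      rw [g1, g2]
      simp only [pvCsum]
      rw [List.getD_eq_getElem query.toList 'a' (by omega),
          List.getD_eq_getElem seq.toList 'a' (by omega)]
      ring
    · have hn2 : 2 ≤ n := by omega
      simp only [pvScoreB]
      rw [if_neg (by omega), if_neg (by omega)]
      have hmid : PySem.Int.floordiv ((lo : Int) + ((lo : Int) + (n : Int))) 2
          = ((lo : Int) + ((lo : Int) + (n : Int))) / 2 :=
        PySem.Int.floordiv_eq_ediv_of_pos (by omega)
      obtain ⟨a, ha1, ha2, hmide⟩ :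
          ∃ a : Nat, 1 ≤ a ∧ a + 1 ≤ n ∧
            PySem.Int.floordiv ((lo : Int) + ((lo : Int) + (n : Int))) 2 = ((lo + a : Nat) : Int) := by
        refine ⟨(PySem.Int.floordiv ((lo : Int) + ((lo : Int) + (n : Int))) 2 - lo).toNat,
          by rw [hmid]; omega, by rw [hmid]; omega, by push_cast; rw [hmid]; omega⟩
      have e2 : (lo : Int) + (n : Int) = ((lo + a : Nat) : Int) + ((n - a : Nat) : Int) := by
        push_cast; omega
      have r1 : pvScoreB query seq (nq : Int) (ns : Int) (L : Int) m mm f (lo : Int)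
            (PySem.Int.floordiv ((lo : Int) + ((lo : Int) + (n : Int))) 2)
          = pvCsum query.toList seq.toList (nq - L) (ns - L) m mm lo a := by
        rw [show PySem.Int.floordiv ((lo : Int) + ((lo : Int) + (n : Int))) 2
              = (lo : Int) + (a : Int) by rw [hmide]; push_cast; ring]
        exact ih a (by omega) lo f ha1 (by omega) (by omega)
      have r2 : pvScoreB query seq (nq : Int) (ns : Int) (L : Int) m mm f
            (PySem.Int.floordiv ((lo : Int) + ((lo : Int) + (n : Int))) 2) ((lo : Int) + (n : Int))
          = pvCsum query.toList seq.toList (nq - L) (ns - L) m mm (lo + a) (n - a) := by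
        rw [hmide, e2]
        exact ih (n - a) (by omega) (lo + a) f (by omega) (by omega) (by omega)
      rw [r1, r2, show n = a + (n - a) by omega, pvCsum_split]
      rw [show a + (n - a) - a = n - a by omega]

-- the linear reference sum in closed form via the match count of the windows
theorem pvCsum_closed (lq ls : List Char) (bq bs : Nat) (m mm : Int) :
    ∀ n lo, bq + lo + n ≤ lq.length → bs + lo + n ≤ ls.length →
    pvCsum lq ls bq bs m mm lo n
      = ((((lq.drop (bq + lo)).take n).zip ((ls.drop (bs + lo)).take n)).countP
            (fun p => p.1 = p.2) : Int) * m
        + ((n : Int)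
            - ((((lq.drop (bq + lo)).take n).zip ((ls.drop (bs + lo)).take n)).countP
                (fun p => p.1 = p.2) : Int)) * mm := by
  intro n
  induction n with
  | zero => intro lo _ _; simp [pvCsum]
  | succ n ih =>
    intro lo hq hs
    rw [List.drop_eq_getElem_cons (by omega : bq + lo < lq.length),
        List.drop_eq_getElem_cons (by omega : bs + lo < ls.length)]
    simp only [List.take_succ_cons, List.zip_cons_cons, List.countP_cons]
    have e1 : bq + lo + 1 = bq + (lo + 1) := by omega
    have e2 : bs + lo + 1 = bs + (lo + 1) := by omega
    rw [e1, e2]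
    simp only [pvCsum]
    rw [ih (lo + 1) (by omega) (by omega),
        List.getD_eq_getElem lq 'a' (by omega), List.getD_eq_getElem ls 'a' (by omega)]
    by_cases hc : lq[bq + lo]'(by omega) = ls[bs + lo]'(by omega)
    · simp only [hc, decide_true]
      push_cast; ring
    · rw [if_neg hc]
      simp only [show (decide (lq[bq + lo]'(by omega) = ls[bs + lo]'(by omega))) = false
          from decide_eq_false hc]
      push_cast; ring

-- ===== VERDICT (by name: the statement is the Claim_ definition above) =====

theorem extend_left_py_spec : Claim_equal_extend_left_py := by
  unfold Claim_equal_extend_left_py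
  intro query seq i_query i_seq match_ mismatch _ hpre
  simp only [Spec_extend_left_py, extend_left_py, extend_left_py_alt]
  by_cases hle : min i_query i_seq ≤ 0
  · rw [PySem.List.pyRange_one_eq_nil (by omega)]
    simp [hle]
  · have h1 : 1 ≤ min i_query i_seq := by omega
    obtain ⟨hq, hs⟩ := hpre h1
    set L : Nat := (min i_query i_seq).toNat with hLdef
    have hiq : i_query = ((i_query.toNat : Nat) : Int) := by omega
    have his : i_seq = ((i_seq.toNat : Nat) : Int) := by omega
    have hmin : min i_query i_seq = ((L : Nat) : Int) := by omega
    -- rewrite A's fold step into pvStep on the char lists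
    have hfold :
        (PySem.List.pyRange 1 (min i_query i_seq + 1) 1).foldl
          (fun st off =>
            match st with
            | none => none
            | some dl =>
              match PySem.Str.pyGet? query (i_query - off), PySem.Str.pyGet? seq (i_seq - off) with
              | some cq, some cs => some (dl.1 + (if cq = cs then match_ else mismatch), off)
              | _, _ => none)
          (some ((0 : Int), (0 : Int)))
        = (PySem.List.pyRange 1 (min i_query i_seq + 1) 1).foldl
            (pvStep query.toList seq.toList i_query.toNat i_seq.toNat match_ mismatch)
            (some ((0 : Int), (0 : Int))) := by
      apply PySem.List.foldl_congr_mem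
      intro acc off hmem
      have hoff : 1 ≤ off ∧ off < min i_query i_seq + 1 := by
        simpa using (PySem.List.mem_pyRange_one.mp hmem)
      have e1 : i_query - off = (((i_query - off).toNat : Nat) : Int) := by omega
      have e2 : i_seq - off = (((i_seq - off).toNat : Nat) : Int) := by omega
      have g1 : PySem.Str.pyGet? query (i_query - off) = query.toList[(i_query - off).toNat]? := by
        rw [e1, PySem.Str.pyGet?_natCast]; congr 1
      have g2 : PySem.Str.pyGet? seq (i_seq - off) = seq.toList[(i_seq - off).toNat]? := by
        rw [e2, PySem.Str.pyGet?_natCast]; congr 1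
      have e3 : (i_query - off).toNat = (((i_query.toNat : Nat) : Int) - off).toNat := by omega
      have e4 : (i_seq - off).toNat = (((i_seq.toNat : Nat) : Int) - off).toNat := by omega
      simp only [pvStep, g1, g2, e3, e4]
    rw [hfold]
    have hcast : min i_query i_seq + 1 = ((L : Nat) : Int) + 1 := by omega
    rw [hcast, pvLoop query.toList seq.toList i_query.toNat i_seq.toNat match_ mismatch
          L (by omega) (by omega) (by omega) (by omega)]
    -- B's side
    rw [if_neg hle]
    have hL0 : L ≠ 0 := by omega
    -- B's score call: lo = 0, hi = ext = L
    have hsc : pvScoreB query seq i_query i_seq (min i_query i_seq) match_ mismatch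
          (min i_query i_seq).toNat 0 (min i_query i_seq)
        = pvCsum query.toList seq.toList (i_query.toNat - L) (i_seq.toNat - L) match_ mismatch 0 L := by
      have h := pvScoreB_eq query seq i_query.toNat i_seq.toNat L match_ mismatch
        (by omega) (by omega) (by omega) (by omega) L 0 L (by omega) (by omega) (by omega)
      simpa [← hiq, ← his, ← hmin] using h
    rw [hsc, pvCsum_closed query.toList seq.toList (i_query.toNat - L) (i_seq.toNat - L)
          match_ mismatch L 0 (by omega) (by omega)]
    simp only [Nat.add_zero, pvCnt, hL0, if_false, Prod.mk.injEq]
    constructor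
    · trivial
    · omega
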